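-- pv_equiv track=rewrite | github.com/eqnguyen/apex-ocr-common | apex_ocr.py | process_time_survived
-- ===== SOURCE A (Python) =====
-- from typing import List
--
-- def process_time_survived(text_list: List[str]) -> List[str]:
--     time_survived_list = []
--
--     for time_text in text_list:
--         try:
--             if len(time_text) > 4:
--                 time_text = (
--                     time_text[:-4] + ":" + time_text[-4:-2] + ":" + time_text[-2:]
--                 )
--             elif len(time_text) > 2:
--                 time_text = time_text[:-2] + ":" + time_text[-2:]
--             time_survived_list.append(time_text)
--         except:
--             time_survived_list.append("0")
--
--     return time_survived_list
-- ===== SOURCE B (Python) =====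
-- from typing import List
--
-- def process_time_survived(text_list: List[str]) -> List[str]:
--     result = []
--     for time_text in text_list:
--         rev_chars = []
--         for i, ch in enumerate(reversed(time_text)):
--             if i == 2 or i == 4:
--                 rev_chars.append(":")
--             rev_chars.append(ch)
--         rev_chars.reverse()
--         result.append("".join(rev_chars))
--     return result
-- ===== Notes on version B (the rewrite author's own statement) =====
-- stated objective: alternative
-- what changed: Replaces A's slice-and-concatenate length ladder by a character-level pass over the reversed string that emits a ':' when the reversed index reaches 2 or 4, then reverses back; no slicing and no length branching.
import Mathlib
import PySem

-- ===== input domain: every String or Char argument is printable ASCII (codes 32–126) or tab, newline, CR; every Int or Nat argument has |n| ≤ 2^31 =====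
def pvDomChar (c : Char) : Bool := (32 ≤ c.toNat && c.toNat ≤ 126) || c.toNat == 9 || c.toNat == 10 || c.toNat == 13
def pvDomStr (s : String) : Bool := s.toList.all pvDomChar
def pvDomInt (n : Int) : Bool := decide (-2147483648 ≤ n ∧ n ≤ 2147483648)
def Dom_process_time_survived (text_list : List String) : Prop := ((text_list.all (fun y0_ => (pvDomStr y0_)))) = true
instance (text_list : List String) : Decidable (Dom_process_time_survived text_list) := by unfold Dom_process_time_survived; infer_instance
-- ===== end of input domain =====

-- B replaces A's slice-and-concatenate length ladder by one character-level pass over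
-- the reversed string (emit ':' at reversed indices 2 and 4), reversed back (objective: alternative).
-- Python string slicing/concatenation is modeled exactly on code points (List Char).

-- ===== PORT A =====
-- per-element body of A's loop: the if/elif length ladder over slices
-- (the try/except never fires: every element is a string, so slicing cannot raise)
def pvFmtA (t : List Char) : List Char :=
  if t.length > 4 then
    PySem.List.slice t none (some (-4)) ++ [':'] ++
      PySem.List.slice t (some (-4)) (some (-2)) ++ [':'] ++
      PySem.List.slice t (some (-2)) none
  else if t.length > 2 then
    PySem.List.slice t none (some (-2)) ++ [':'] ++ PySem.List.slice t (some (-2)) none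
  else t

def process_time_survived (text_list : List String) : List String :=
  text_list.foldl (fun acc s => acc ++ [String.ofList (pvFmtA s.toList)]) []

-- ===== PORT B =====
-- per-element body of B: fold over enumerate(reversed(t)), inserting ':' before the
-- characters at reversed indices 2 and 4, then reverse the accumulated list back
def pvFmtB (t : List Char) : List Char :=
  ((PySem.List.enumerate t.reverse 0).foldl
      (fun acc p => (if p.1 == 2 || p.1 == 4 then acc ++ [':'] else acc) ++ [p.2]) []).reverse

def process_time_survived_alt (text_list : List String) : List String :=
  text_list.foldl (fun acc s => acc ++ [String.ofList (pvFmtB s.toList)]) []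

-- ===== PRECONDITION & SPEC =====
def Spec_process_time_survived (text_list : List String) (out : List String) : Prop := out = process_time_survived_alt text_list
instance (text_list : List String) (out : List String) : Decidable (Spec_process_time_survived text_list out) := by unfold Spec_process_time_survived; infer_instance

-- ===== CLAIM (what is proved, stated in full; the proofs are below) =====
def Claim_equal_process_time_survived : Prop := ∀ (text_list : List String), Dom_process_time_survived text_list → Spec_process_time_survived text_list (process_time_survived text_list)

-- ===== LEMMAS AND PROOFS =====

-- past reversed index 4 the fold only appends characters
lemma foldB_tail (rest : List Char) (n : Int) (hn : 4 < n) (acc : List Char) :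
    (PySem.List.enumerate rest n).foldl
      (fun acc p => (if p.1 == 2 || p.1 == 4 then acc ++ [':'] else acc) ++ [p.2]) acc
    = acc ++ rest := by
  induction rest generalizing n acc with
  | nil => simp [PySem.List.enumerate_nil]
  | cons c cs ih =>
    have h2 : (n == (2 : Int)) = false := by simp; omega
    have h4 : (n == (4 : Int)) = false := by simp; omega
    rw [PySem.List.enumerate_cons]
    simp only [List.foldl_cons, h2, h4, Bool.or_self]
    rw [ih (n + 1) (by omega)]
    simp

lemma pvFmt_rev (r : List Char) : pvFmtA r.reverse = pvFmtB r.reverse := by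
  match r with
  | [] | [a] | [a, b] =>
    simp [pvFmtA, pvFmtB, PySem.List.enumerate_cons, PySem.List.enumerate_nil]
  | [a, b, c] | [a, b, c, d] =>
    simp [pvFmtA, pvFmtB, PySem.List.enumerate_cons, PySem.List.enumerate_nil,
      PySem.List.slice, PySem.List.clampIdx]
  | a :: b :: c :: d :: e :: rest =>
    have hB : pvFmtB (a :: b :: c :: d :: e :: rest).reverse
        = rest.reverse ++ [e, ':', d, c, ':', b, a] := by
      unfold pvFmtB
      rw [List.reverse_reverse]
      have hpre : (PySem.List.enumerate (a :: b :: c :: d :: e :: rest) 0).foldl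
          (fun acc p => (if p.1 == 2 || p.1 == 4 then acc ++ [':'] else acc) ++ [p.2]) []
          = (PySem.List.enumerate rest 5).foldl
          (fun acc p => (if p.1 == 2 || p.1 == 4 then acc ++ [':'] else acc) ++ [p.2])
          [a, b, ':', c, d, ':', e] := by
        simp only [PySem.List.enumerate_cons, List.foldl_cons]
        rfl
      rw [hpre, foldB_tail rest 5 (by omega)]
      simp
    rw [hB]
    unfold pvFmtA
    have hlen : (a :: b :: c :: d :: e :: rest).reverse.length = rest.length + 5 := by
      simp
    rw [if_pos (by omega)]
    rw [PySem.List.slice_to_neg_ofNat _ 4 (by omega),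
        PySem.List.slice_from_neg_ofNat _ 2 (by omega)]
    have hs2 : PySem.List.slice (a :: b :: c :: d :: e :: rest).reverse
        (some (-4)) (some (-2))
        = ((a :: b :: c :: d :: e :: rest).reverse.drop
            ((a :: b :: c :: d :: e :: rest).reverse.length - 4)).take 2 := by
      simp only [PySem.List.slice]
      rw [PySem.List.clampIdx_neg_ofNat _ 4 (by omega),
          PySem.List.clampIdx_neg_ofNat _ 2 (by omega)]
      congr 1
      omega
    rw [hs2]
    have hrev : (a :: b :: c :: d :: e :: rest).reverse
        = rest.reverse ++ [e, d, c, b, a] := by simp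
    rw [hlen, hrev]
    have h1 : rest.length + 5 - 4 = rest.reverse.length + 1 := by simp
    have h0 : rest.length + 5 - 2 = rest.reverse.length + 3 := by simp
    rw [h1, h0, List.take_append, List.drop_append, List.drop_append]
    simp [List.drop_eq_nil_of_le]

lemma pvFmt_eq (t : List Char) : pvFmtA t = pvFmtB t := by
  have := pvFmt_rev t.reverse
  rwa [List.reverse_reverse] at this

lemma foldl_snoc_cong (f g : String → String) (h : ∀ s, f s = g s) (xs : List String)
    (acc : List String) :
    xs.foldl (fun a s => a ++ [f s]) acc = xs.foldl (fun a s => a ++ [g s]) acc := by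
  induction xs generalizing acc with
  | nil => rfl
  | cons x xs ih => simp only [List.foldl_cons, h x, ih]

-- ===== VERDICT (by name: the statement is the Claim_ definition above) =====
theorem process_time_survived_spec : Claim_equal_process_time_survived := by
  intro text_list _
  unfold Spec_process_time_survived process_time_survived process_time_survived_alt
  exact foldl_snoc_cong _ _ (fun s => by rw [pvFmt_eq]) text_list []
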